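-- pv_equiv track=rewrite | github.com/shenyuanwu/Racket-learning | chatbot.py | sentence_category
-- ===== SOURCE A (Python) =====
-- KEYWORD_CATEGORIES = {"happy":["great", "excited", "happy", "awesome"],"uncertain":["maybe", "worried", "dunno"]}
--
-- def keyword_category(potential_keyword):
--     """takes a potential keyword and returns the associated category
--
--     str -> str"""
--     key = list(KEYWORD_CATEGORIES)
--     for keyword in key:
--         if potential_keyword.lower() in KEYWORD_CATEGORIES[keyword]:
--             return keyword
--     return "undefined"
--
-- def sentence_category(sentence):
--     """takes a sentene, breaks it up into words*, checks the category of the words, and returns a category for the sentence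
--
--     str -> str"""
--     lst = sentence.split()
--     lst_result = []
--     for word in lst:
--         lst_result.append(keyword_category(word))
--     if "uncertain" in lst_result:
--         return "uncertain"
--     elif "happy" in lst_result:
--         return "happy"
--     else:
--         return "undefined"
-- ===== SOURCE B (Python) =====
-- KEYWORD_CATEGORIES = {"happy": ["great", "excited", "happy", "awesome"],
--                       "uncertain": ["maybe", "worried", "dunno"]}
--
-- def sentence_category(sentence):
--     words = set()
--     for w in sentence.split():
--         words.add(w.lower())
--     for cat in ("uncertain", "happy"):
--         if any(kw in words for kw in KEYWORD_CATEGORIES[cat]):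
--             return cat
--     return "undefined"
-- ===== Notes on version B (the rewrite author's own statement) =====
-- stated objective: idiomatic
-- what changed: Inverts the traversal: builds the set of lowercased words once, then probes that set with each category's keywords in priority order (uncertain, then happy), instead of mapping every word through keyword_category and scanning the resulting category list twice.
import Mathlib
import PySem

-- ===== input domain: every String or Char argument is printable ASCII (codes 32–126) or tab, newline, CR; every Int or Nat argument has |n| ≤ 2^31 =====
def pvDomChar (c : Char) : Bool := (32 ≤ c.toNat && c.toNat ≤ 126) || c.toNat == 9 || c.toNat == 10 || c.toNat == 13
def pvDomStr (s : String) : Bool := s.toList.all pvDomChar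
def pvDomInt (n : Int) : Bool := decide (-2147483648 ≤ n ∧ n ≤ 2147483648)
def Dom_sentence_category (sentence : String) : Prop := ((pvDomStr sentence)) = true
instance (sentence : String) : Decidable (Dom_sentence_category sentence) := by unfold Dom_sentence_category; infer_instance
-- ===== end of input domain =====

-- B inverts the traversal (keywords probe a set of lowercased words, in category priority order)
-- instead of mapping each word to its category and scanning the category list; objective: idiomatic.

-- ===== PORT A =====
def KEYWORD_CATEGORIES : PySem.Dict String (List String) :=
  PySem.Dict.ofList [("happy", ["great", "excited", "happy", "awesome"]),
                     ("uncertain", ["maybe", "worried", "dunno"])]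

-- the 'for keyword in key' loop of keyword_category (first match returns)
def keywordCategoryGo (potential_keyword : String) : List String → String
  | [] => "undefined"
  | k :: rest =>
    if PySem.Str.lower potential_keyword ∈ (KEYWORD_CATEGORIES.get? k).getD [] then k
    else keywordCategoryGo potential_keyword rest

def keyword_category (potential_keyword : String) : String :=
  keywordCategoryGo potential_keyword KEYWORD_CATEGORIES.keys

def sentence_category (sentence : String) : String :=
  let lst := PySem.Str.split₀ sentence
  let lst_result := lst.map keyword_category
  if "uncertain" ∈ lst_result then "uncertain"
  else if "happy" ∈ lst_result then "happy"
  else "undefined"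

-- ===== PORT B =====
-- words = set(); for w in sentence.split(): words.add(w.lower())
def altWords (sentence : String) : PySem.Set String :=
  (PySem.Str.split₀ sentence).foldl (fun s w => PySem.Set.add s (PySem.Str.lower w)) PySem.Set.empty

-- for cat in ("uncertain", "happy"): if any(kw in words for kw in KEYWORD_CATEGORIES[cat]): return cat
def altGo (words : PySem.Set String) : List String → String
  | [] => "undefined"
  | cat :: rest =>
    if ((KEYWORD_CATEGORIES.get? cat).getD []).any (fun kw => PySem.Set.contains words kw) then cat
    else altGo words rest

def sentence_category_alt (sentence : String) : String :=
  altGo (altWords sentence) ["uncertain", "happy"]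

-- ===== PRECONDITION & SPEC =====
def Spec_sentence_category (sentence : String) (out : String) : Prop := out = sentence_category_alt sentence
instance (sentence : String) (out : String) : Decidable (Spec_sentence_category sentence out) := by unfold Spec_sentence_category; infer_instance

-- ===== CLAIM (what is proved, stated in full; the proofs are below) =====
def Claim_equal_sentence_category : Prop := ∀ (sentence : String), Dom_sentence_category sentence → Spec_sentence_category sentence (sentence_category sentence)

-- ===== LEMMAS AND PROOFS =====

-- per-word characterisation of A's keyword_category
theorem kc_eq (w : String) :
    keyword_category w =
      (if PySem.Str.lower w ∈ ["great", "excited", "happy", "awesome"] then "happy"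
       else if PySem.Str.lower w ∈ ["maybe", "worried", "dunno"] then "uncertain"
       else "undefined") := by
  have hk : KEYWORD_CATEGORIES.keys = ["happy", "uncertain"] := by decide
  have gh : (KEYWORD_CATEGORIES.get? "happy").getD [] = ["great", "excited", "happy", "awesome"] := by decide
  have gu : (KEYWORD_CATEGORIES.get? "uncertain").getD [] = ["maybe", "worried", "dunno"] := by decide
  simp only [keyword_category, hk, keywordCategoryGo, gh, gu]

theorem disjoint_kw (s : String) (h : s ∈ ["maybe", "worried", "dunno"]) :
    s ∉ ["great", "excited", "happy", "awesome"] := by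
  simp only [List.mem_cons, List.not_mem_nil, or_false] at h ⊢
  rcases h with h | h | h <;> subst h <;> decide

theorem altWords_mem (sentence : String) (kw : String) :
    PySem.Set.contains (altWords sentence) kw = true ↔
      ∃ w ∈ PySem.Str.split₀ sentence, PySem.Str.lower w = kw := by
  have : altWords sentence = PySem.Set.ofList ((PySem.Str.split₀ sentence).map PySem.Str.lower) := by
    simp [altWords, PySem.Set.ofList_eq_foldl, List.foldl_map, PySem.Set.empty]
  rw [this]
  simp [PySem.Set.contains, PySem.Set.mem_ofList, List.mem_map, eq_comm]

-- ===== VERDICT =====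
theorem sentence_category_spec : Claim_equal_sentence_category := by
  intro sentence _
  unfold Spec_sentence_category sentence_category sentence_category_alt
  have gh : (KEYWORD_CATEGORIES.get? "happy").getD [] = ["great", "excited", "happy", "awesome"] := by decide
  have gu : (KEYWORD_CATEGORIES.get? "uncertain").getD [] = ["maybe", "worried", "dunno"] := by decide
  simp only [altGo, gh, gu]
  have hu : ("uncertain" ∈ (PySem.Str.split₀ sentence).map keyword_category) ↔
      ∃ w ∈ PySem.Str.split₀ sentence, PySem.Str.lower w ∈ ["maybe", "worried", "dunno"] := by
    constructor
    · intro h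
      rw [List.mem_map] at h
      obtain ⟨w, hw, hkc⟩ := h
      rw [kc_eq] at hkc
      split_ifs at hkc with h1 h2
      · exact absurd hkc (by decide)
      · exact ⟨w, hw, h2⟩
      · exact absurd hkc (by decide)
    · rintro ⟨w, hw, hmem⟩
      rw [List.mem_map]
      refine ⟨w, hw, ?_⟩
      rw [kc_eq, if_neg (disjoint_kw _ hmem), if_pos hmem]
  have hh : ("happy" ∈ (PySem.Str.split₀ sentence).map keyword_category) ↔
      ∃ w ∈ PySem.Str.split₀ sentence, PySem.Str.lower w ∈ ["great", "excited", "happy", "awesome"] := by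
    constructor
    · intro h
      rw [List.mem_map] at h
      obtain ⟨w, hw, hkc⟩ := h
      rw [kc_eq] at hkc
      split_ifs at hkc with h1 h2
      · exact ⟨w, hw, h1⟩
      · exact absurd hkc (by decide)
      · exact absurd hkc (by decide)
    · rintro ⟨w, hw, hmem⟩
      rw [List.mem_map]
      exact ⟨w, hw, by rw [kc_eq, if_pos hmem]⟩
  have hbu : ((["maybe", "worried", "dunno"] : List String).any
        (fun kw => PySem.Set.contains (altWords sentence) kw) = true) ↔
      ∃ w ∈ PySem.Str.split₀ sentence, PySem.Str.lower w ∈ ["maybe", "worried", "dunno"] := by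
    simp only [List.any_eq_true]
    constructor
    · rintro ⟨kw, hkw, hc⟩
      obtain ⟨w, hw, hlw⟩ := (altWords_mem sentence kw).1 hc
      exact ⟨w, hw, by rw [hlw]; exact hkw⟩
    · rintro ⟨w, hw, hmem⟩
      exact ⟨PySem.Str.lower w, hmem, (altWords_mem sentence _).2 ⟨w, hw, rfl⟩⟩
  have hbh : ((["great", "excited", "happy", "awesome"] : List String).any
        (fun kw => PySem.Set.contains (altWords sentence) kw) = true) ↔
      ∃ w ∈ PySem.Str.split₀ sentence, PySem.Str.lower w ∈ ["great", "excited", "happy", "awesome"] := by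
    simp only [List.any_eq_true]
    constructor
    · rintro ⟨kw, hkw, hc⟩
      obtain ⟨w, hw, hlw⟩ := (altWords_mem sentence kw).1 hc
      exact ⟨w, hw, by rw [hlw]; exact hkw⟩
    · rintro ⟨w, hw, hmem⟩
      exact ⟨PySem.Str.lower w, hmem, (altWords_mem sentence _).2 ⟨w, hw, rfl⟩⟩
  exact if_congr (hu.trans hbu.symm) rfl (if_congr (hh.trans hbh.symm) rfl rfl)
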